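-- pv_equiv track=rewrite | github.com/katmh/helix | disparity.py | generateSSList
-- ===== SOURCE A (Python) =====
-- def generateSSList(SS):
-- 	SSRegions = []
--
-- 	for i, char in enumerate(SS):
-- 		if i == 0:
-- 			SSRegions.append((i, char))
-- 		elif SS[i] != SS[i-1]:
-- 			SSRegions.append((i, char))
-- 		elif SS[i] == SS[i-1]:
-- 			pass
--
-- 	return SSRegions
-- ===== SOURCE B (Python) =====
-- def generateSSList(SS):
-- 	SSRegions = []
-- 	i = 0
-- 	n = len(SS)
-- 	while i < n:
-- 		ch = SS[i]
-- 		SSRegions.append((i, ch))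
-- 		i += 1
-- 		while i < n and SS[i] == ch:
-- 			i += 1
-- 	return SSRegions
-- ===== Notes on version B (the rewrite author's own statement) =====
-- stated objective: alternative
-- what changed: Replaces the enumerate loop that compares each character with its predecessor by index (SS[i] != SS[i-1]) with an outer loop over maximal runs: record the run start, then skip forward while the character repeats.
import Mathlib
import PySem

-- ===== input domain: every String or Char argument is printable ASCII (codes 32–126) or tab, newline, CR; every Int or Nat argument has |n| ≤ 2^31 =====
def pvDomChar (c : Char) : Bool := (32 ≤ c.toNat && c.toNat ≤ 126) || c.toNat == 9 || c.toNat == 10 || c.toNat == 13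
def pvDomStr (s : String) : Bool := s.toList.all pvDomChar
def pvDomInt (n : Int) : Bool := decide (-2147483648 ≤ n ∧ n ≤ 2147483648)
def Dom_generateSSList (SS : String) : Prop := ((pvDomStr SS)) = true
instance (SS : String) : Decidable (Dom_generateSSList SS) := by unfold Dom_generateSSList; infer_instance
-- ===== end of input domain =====

-- B walks maximal runs of equal characters (record start, skip the run) instead of
-- comparing each character with its predecessor; same output, alternative structure.

-- ===== PORT A =====
def generateSSList (SS : String) : List (Int × String) :=
  (PySem.List.enumerate SS.toList).foldl (fun acc p =>
    if p.1 == 0 then acc ++ [(p.1, String.ofList [p.2])]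
    else if PySem.Str.pyGet? SS p.1 ≠ PySem.Str.pyGet? SS (p.1 - 1) then
      acc ++ [(p.1, String.ofList [p.2])]
    else acc) []

-- ===== PORT B =====
-- inner while loop: length of the leading run of `c` in `l`
def pvRunLen (c : Char) : List Char → Nat
  | [] => 0
  | x :: xs => if x == c then pvRunLen c xs + 1 else 0

-- outer while loop: emit the run start, skip the run
def pvRuns (l : List Char) (i : Nat) : List (Int × String) :=
  match l with
  | [] => []
  | c :: rest =>
    ((i : Int), String.ofList [c]) :: pvRuns (rest.drop (pvRunLen c rest)) (i + 1 + pvRunLen c rest)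
termination_by l.length
decreasing_by
  simp only [List.length_drop, List.length_cons]
  omega

def generateSSList_alt (SS : String) : List (Int × String) := pvRuns SS.toList 0

-- ===== PRECONDITION & SPEC =====
def Spec_generateSSList (SS : String) (out : List (Int × String)) : Prop := out = generateSSList_alt SS
instance (SS : String) (out : List (Int × String)) : Decidable (Spec_generateSSList SS out) := by unfold Spec_generateSSList; infer_instance

-- ===== CLAIM (what is proved, stated in full; the proofs are below) =====
def Claim_equal_generateSSList : Prop := ∀ (SS : String), Dom_generateSSList SS → Spec_generateSSList SS (generateSSList SS)

-- ===== LEMMAS AND PROOFS =====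

-- reference: pairwise recursion carrying the previous character
def refGo (prev : Char) (l : List Char) (i : Nat) : List (Int × String) :=
  match l with
  | [] => []
  | c :: rest =>
    if c = prev then refGo c rest (i + 1)
    else ((i : Int), String.ofList [c]) :: refGo c rest (i + 1)

lemma refGo_eq_pvRuns (l : List Char) : ∀ (c : Char) (j : Nat),
    refGo c l j = pvRuns (l.drop (pvRunLen c l)) (j + pvRunLen c l) := by
  induction l with
  | nil => intro c j; simp [refGo, pvRunLen, pvRuns]
  | cons x xs ih =>
    intro c j
    by_cases h : x = c
    · subst h
      simp only [refGo, pvRunLen, beq_self_eq_true, if_true, List.drop_succ_cons]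
      rw [ih x (j + 1)]
      congr 1
      omega
    · simp only [refGo, pvRunLen, if_neg h, beq_iff_eq, h, if_false, List.drop_zero,
        Nat.add_zero, pvRuns]
      rw [ih x (j + 1)]

lemma pvRuns_cons (c : Char) (rest : List Char) (i : Nat) :
    pvRuns (c :: rest) i = ((i : Int), String.ofList [c]) :: refGo c rest (i + 1) := by
  rw [pvRuns, refGo_eq_pvRuns]

-- the fold over the tail of the enumeration equals refGo, given the list splits as pre ++ c :: suf
lemma foldA_eq_refGo (SS : String) (suf : List Char) : ∀ (pre : List Char) (c : Char)
    (acc : List (Int × String)), SS.toList = pre ++ c :: suf →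
    (PySem.List.enumerate suf ((pre.length : Int) + 1)).foldl (fun acc p =>
      if p.1 == 0 then acc ++ [(p.1, String.ofList [p.2])]
      else if PySem.Str.pyGet? SS p.1 ≠ PySem.Str.pyGet? SS (p.1 - 1) then
        acc ++ [(p.1, String.ofList [p.2])]
      else acc) acc = acc ++ refGo c suf (pre.length + 1) := by
  induction suf with
  | nil => intro pre c acc _; simp [PySem.List.enumerate, refGo]
  | cons x xs ih =>
    intro pre c acc hsplit
    rw [PySem.List.enumerate_cons, List.foldl_cons]
    have hne0 : (((pre.length : Int) + 1) == 0) = false := by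
      simp; omega
    have hget1 : PySem.Str.pyGet? SS ((pre.length : Int) + 1) = some x := by
      have : ((pre.length : Int) + 1) = (((pre.length + 1 : Nat) : Int)) := by push_cast; ring
      rw [this, PySem.Str.pyGet?_natCast, hsplit]
      have : pre ++ c :: x :: xs = (pre ++ [c]) ++ x :: xs := by simp
      rw [this]
      have hl : pre.length + 1 = (pre ++ [c]).length := by simp
      rw [hl, List.getElem?_append_right (by omega)]
      simp
    have hget0 : PySem.Str.pyGet? SS ((pre.length : Int) + 1 - 1) = some c := by
      have : ((pre.length : Int) + 1 - 1) = ((pre.length : Nat) : Int) := by ring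
      rw [this, PySem.Str.pyGet?_natCast, hsplit, List.getElem?_append_right (by omega)]
      simp
    have hIH := ih (pre ++ [c]) x
    have hsplit' : SS.toList = (pre ++ [c]) ++ x :: xs := by simp [hsplit]
    have hlen : (((pre ++ [c]).length : Int) + 1) = ((pre.length : Int) + 1) + 1 := by
      simp
    by_cases hxc : x = c
    · subst hxc
      simp only [hne0, Bool.false_eq_true, if_false, hget1, hget0, ne_eq,
        not_true_eq_false, if_false]
      rw [← hlen, hIH acc hsplit']
      simp [refGo]
    · have hcond : (PySem.Str.pyGet? SS ((pre.length : Int) + 1) ≠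
          PySem.Str.pyGet? SS ((pre.length : Int) + 1 - 1)) := by
        rw [hget1, hget0]; simp [hxc]
      simp only [hne0, Bool.false_eq_true, if_false, if_pos hcond]
      rw [← hlen, hIH (acc ++ [(((pre.length : Int) + 1), String.ofList [x])]) hsplit']
      simp only [refGo, if_neg hxc, List.append_assoc]
      push_cast
      simp
-- ===== VERDICT (by name: the statement is the Claim_ definition above) =====
theorem generateSSList_spec : Claim_equal_generateSSList := by
  intro SS _
  unfold Spec_generateSSList generateSSList generateSSList_alt
  cases hl : SS.toList with
  | nil => simp [PySem.List.enumerate, pvRuns]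
  | cons c rest =>
    rw [PySem.List.enumerate_cons, List.foldl_cons]
    have h := foldA_eq_refGo SS rest [] c [((0:Int), String.ofList [c])] (by simpa using hl)
    simp only [List.length_nil, Nat.cast_zero, zero_add] at h
    simp only [show ((0:Int) == 0) = true from rfl, if_true, List.nil_append, zero_add]
    rw [h, pvRuns_cons]
    simp
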